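-- pv_equiv track=rewrite | github.com/Si1veR123/NEAT-Tetris | app.py | check_block_hit
-- ===== SOURCE A (Python) =====
-- def find_stopped_blocks_pos(stopped_blocks):
--     """
--     :param stopped_blocks: list of stopped blocks
--     :return: positions of blocks that have stopped
--     """
--     found_blocks = []
--     for row_count, row in enumerate(stopped_blocks):
--         for col_count, col in enumerate(row):
--             if col != 4:
--                 found_blocks.append([col, (col_count+1, 15-row_count+1)])
--     return found_blocks
--
-- def check_block_hit(blocks, others, direc='above'):
--     """
--     :param blocks: current block in play
--     :param others: blocks that have stopped
--     :param direc: direction to check if they are next to each other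
--     :return: True if found next to each other in specified direction, None if not
--     """
--     others_pos = [block[1] for block in find_stopped_blocks_pos(others)]
--     for other_block in others_pos:
--         for block in blocks:
--             if direc == 'above':
--                 if block[1] + 1 == other_block[1] and block[0] == other_block[0]:
--                     return True
--             elif direc == 'left':
--                 if block[1] == other_block[1] and block[0] - 1 == other_block[0]:
--                     return True
--             elif direc == 'right':
--                 if block[1] == other_block[1] and block[0] + 1 == other_block[0]:
--                     return True
-- ===== SOURCE B (Python) =====
-- def check_block_hit(blocks, others, direc='above'):
--     offsets = {'above': (0, 1), 'left': (-1, 0), 'right': (1, 0)}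
--     if direc not in offsets:
--         return None
--     dx, dy = offsets[direc]
--     stops = set()
--     for r, row in enumerate(others):
--         for c, v in enumerate(row):
--             if v != 4:
--                 stops.add((c + 1, 16 - r))
--     targets = {(b[0] + dx, b[1] + dy) for b in blocks}
--     return True if targets & stops else None
-- ===== Notes on version B (the rewrite author's own statement) =====
-- stated objective: faster
-- what changed: Replaces A's nested other-block x block scan with a per-direction branch chain by a direction-to-offset table, one set of stopped positions and one set of offset block positions, answering via set intersection.
-- outside the precondition, e.g. on check_block_hit([[1]], [[4]], 'above'): A returns None, B raises IndexError
import Mathlib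
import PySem

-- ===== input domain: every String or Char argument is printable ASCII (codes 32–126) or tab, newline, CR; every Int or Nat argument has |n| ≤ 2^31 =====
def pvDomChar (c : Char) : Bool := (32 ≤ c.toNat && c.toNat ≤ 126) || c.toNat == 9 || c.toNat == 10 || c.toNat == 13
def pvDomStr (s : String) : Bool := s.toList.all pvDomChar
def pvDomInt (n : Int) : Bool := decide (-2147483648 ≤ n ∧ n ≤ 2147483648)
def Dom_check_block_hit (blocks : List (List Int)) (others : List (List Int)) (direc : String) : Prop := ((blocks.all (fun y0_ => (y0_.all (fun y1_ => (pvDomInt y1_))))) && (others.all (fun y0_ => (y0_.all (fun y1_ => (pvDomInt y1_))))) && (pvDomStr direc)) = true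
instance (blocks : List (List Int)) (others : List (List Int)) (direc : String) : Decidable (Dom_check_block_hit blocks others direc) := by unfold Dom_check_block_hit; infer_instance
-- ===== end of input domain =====

-- B replaces A's nested pairwise scan + branch chain by a direction->offset table, a set of
-- stopped positions and a set of shifted block positions, returning some true iff they intersect
-- (objective: simpler/idiomatic; equivalence proved on Pre_, which excludes blocks rows shorter
-- than 2 when direc is a real direction — there Python B raises IndexError while A may return None).

-- ===== PORT A =====
-- block[0]/block[1] are ported as pyGetD … 0: exact under Pre_ (every block has length ≥ 2
-- whenever direc is one of the three directions); where Python would raise IndexError is outside Pre_.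
def find_stopped_blocks_pos (stopped_blocks : List (List Int)) : List (Int × (Int × Int)) :=
  (PySem.List.enumerate stopped_blocks).foldl (fun found rr =>
    (PySem.List.enumerate rr.2).foldl (fun found2 cv =>
      if cv.2 ≠ 4 then found2 ++ [(cv.2, (cv.1 + 1, 15 - rr.1 + 1))] else found2) found) []

-- inner 'for block in blocks' loop (early return True)
def pvInnerA (direc : String) (other : Int × Int) : List (List Int) → Option Bool
  | [] => none
  | b :: bs =>
    if direc = "above" then
      if PySem.List.pyGetD b 1 0 + 1 = other.2 ∧ PySem.List.pyGetD b 0 0 = other.1 then some true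
      else pvInnerA direc other bs
    else if direc = "left" then
      if PySem.List.pyGetD b 1 0 = other.2 ∧ PySem.List.pyGetD b 0 0 - 1 = other.1 then some true
      else pvInnerA direc other bs
    else if direc = "right" then
      if PySem.List.pyGetD b 1 0 = other.2 ∧ PySem.List.pyGetD b 0 0 + 1 = other.1 then some true
      else pvInnerA direc other bs
    else pvInnerA direc other bs

-- outer 'for other_block in others_pos' loop
def pvOuterA (direc : String) (blocks : List (List Int)) : List (Int × Int) → Option Bool
  | [] => none
  | o :: os =>
    match pvInnerA direc o blocks with
    | some r => some r
    | none => pvOuterA direc blocks os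

def check_block_hit (blocks : List (List Int)) (others : List (List Int)) (direc : String) : Option Bool :=
  pvOuterA direc blocks ((find_stopped_blocks_pos others).map (·.2))

-- ===== PORT B =====
def pvOffset (direc : String) : Option (Int × Int) :=
  if direc = "above" then some (0, 1)
  else if direc = "left" then some (-1, 0)
  else if direc = "right" then some (1, 0)
  else none

def pvStops (others : List (List Int)) : PySem.Set (Int × Int) :=
  (PySem.List.enumerate others).foldl (fun s rr =>
    (PySem.List.enumerate rr.2).foldl (fun s2 cv =>
      if cv.2 ≠ 4 then PySem.Set.add s2 (cv.1 + 1, 16 - rr.1) else s2) s) PySem.Set.empty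

def check_block_hit_alt (blocks : List (List Int)) (others : List (List Int)) (direc : String) : Option Bool :=
  match pvOffset direc with
  | none => none
  | some (dx, dy) =>
    let stops := pvStops others
    let targets := PySem.Set.ofList (blocks.map fun b =>
      (PySem.List.pyGetD b 0 0 + dx, PySem.List.pyGetD b 1 0 + dy))
    if PySem.Set.inter targets stops ≠ [] then some true else none

-- ===== PRECONDITION & SPEC =====
-- Pre_ excludes inputs where some row of blocks has length < 2 while direc is a real direction:
-- Python A raises IndexError there whenever it reaches such a row (and on the remaining such
-- inputs returns None by accident of loop order), while Python B always raises IndexError there.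
def Pre_check_block_hit (blocks : List (List Int)) (others : List (List Int)) (direc : String) : Prop :=
  (direc = "above" ∨ direc = "left" ∨ direc = "right") → ∀ b ∈ blocks, 2 ≤ b.length
instance (blocks : List (List Int)) (others : List (List Int)) (direc : String) : Decidable (Pre_check_block_hit blocks others direc) := by unfold Pre_check_block_hit; infer_instance

def pvWitness_check_block_hit : List (List Int) × List (List Int) × String := ([[1, 2]], [[5]], "above")

def Spec_check_block_hit (blocks : List (List Int)) (others : List (List Int)) (direc : String) (out : Option Bool) : Prop := out = check_block_hit_alt blocks others direc
instance (blocks : List (List Int)) (others : List (List Int)) (direc : String) (out : Option Bool) : Decidable (Spec_check_block_hit blocks others direc out) := by unfold Spec_check_block_hit; infer_instance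

-- ===== CLAIM (what is proved, stated in full; the proofs are below) =====
def Claim_equal_check_block_hit : Prop := ∀ (blocks : List (List Int)) (others : List (List Int)) (direc : String), Dom_check_block_hit blocks others direc → Pre_check_block_hit blocks others direc → Spec_check_block_hit blocks others direc (check_block_hit blocks others direc)

-- ===== LEMMAS AND PROOFS =====

-- the Boolean hit condition A tests for one (other, block) pair
def pvCondB (direc : String) (o : Int × Int) (b : List Int) : Bool :=
  if direc = "above" then
    decide (PySem.List.pyGetD b 1 0 + 1 = o.2 ∧ PySem.List.pyGetD b 0 0 = o.1)
  else if direc = "left" then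
    decide (PySem.List.pyGetD b 1 0 = o.2 ∧ PySem.List.pyGetD b 0 0 - 1 = o.1)
  else if direc = "right" then
    decide (PySem.List.pyGetD b 1 0 = o.2 ∧ PySem.List.pyGetD b 0 0 + 1 = o.1)
  else false

theorem pvInnerA_eq (direc : String) (o : Int × Int) (bs : List (List Int)) :
    pvInnerA direc o bs = if bs.any (pvCondB direc o) then some true else none := by
  induction bs with
  | nil => simp [pvInnerA]
  | cons b bs ih =>
    simp only [pvInnerA, List.any_cons, ih]
    by_cases h1 : direc = "above" <;> by_cases h2 : direc = "left" <;>
      by_cases h3 : direc = "right" <;>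
      simp only [h1, h2, h3, if_pos, if_neg, pvCondB, ite_true, ite_false] <;>
      (split_ifs <;> simp_all [pvCondB] <;> tauto)

theorem pvOuterA_eq (direc : String) (blocks : List (List Int)) (os : List (Int × Int)) :
    pvOuterA direc blocks os
      = if os.any (fun o => blocks.any (pvCondB direc o)) then some true else none := by
  induction os with
  | nil => simp [pvOuterA]
  | cons o os ih =>
    simp only [pvOuterA, pvInnerA_eq, ih, List.any_cons]
    by_cases hb : blocks.any (pvCondB direc o) = true
    · simp [hb]
    · simp only [Bool.not_eq_true] at hb
      simp only [hb, Bool.false_or]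
      rfl

-- membership in a conditional Set.add fold
theorem pv_mem_foldl_add {α β : Type} [BEq α] [LawfulBEq α] (l : List β) (p : β → Prop)
    [DecidablePred p] (g : β → α) (s : List α) (x : α) :
    x ∈ l.foldl (fun s b => if p b then PySem.Set.add s (g b) else s) s
      ↔ x ∈ s ∨ ∃ b ∈ l, p b ∧ x = g b := by
  induction l generalizing s with
  | nil => simp
  | cons b l ih =>
    simp only [List.foldl_cons, ih]
    by_cases hb : p b
    · simp only [if_pos hb, PySem.Set.mem_add, List.mem_cons]
      constructor
      · rintro (⟨h | h⟩ | h)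
        · exact Or.inl h
        · exact Or.inr ⟨b, Or.inl rfl, hb, h⟩
        · rcases h with ⟨c, hc, hpc, hx⟩; exact Or.inr ⟨c, Or.inr hc, hpc, hx⟩
      · rintro (h | ⟨c, (rfl | hc), hpc, hx⟩)
        · exact Or.inl (Or.inl h)
        · exact Or.inl (Or.inr hx)
        · exact Or.inr ⟨c, hc, hpc, hx⟩
    · simp only [if_neg hb, List.mem_cons]
      constructor
      · rintro (h | ⟨c, hc, hpc, hx⟩)
        · exact Or.inl h
        · exact Or.inr ⟨c, Or.inr hc, hpc, hx⟩
      · rintro (h | ⟨c, (rfl | hc), hpc, hx⟩)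
        · exact Or.inl h
        · exact absurd hpc hb
        · exact Or.inr ⟨c, hc, hpc, hx⟩

-- membership in a conditional append fold (A's found_blocks loop shape)
theorem pv_mem_foldl_append {β γ : Type} (l : List β) (p : β → Prop)
    [DecidablePred p] (g : β → γ) (s : List γ) (x : γ) :
    x ∈ l.foldl (fun s b => if p b then s ++ [g b] else s) s
      ↔ x ∈ s ∨ ∃ b ∈ l, p b ∧ x = g b := by
  induction l generalizing s with
  | nil => simp
  | cons b l ih =>
    simp only [List.foldl_cons, ih]
    by_cases hb : p b
    · simp only [if_pos hb, List.mem_append, List.mem_cons, List.not_mem_nil, or_false]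
      constructor
      · rintro (⟨h | h⟩ | h)
        · exact Or.inl h
        · exact Or.inr ⟨b, Or.inl rfl, hb, h⟩
        · rcases h with ⟨c, hc, hpc, hx⟩; exact Or.inr ⟨c, Or.inr hc, hpc, hx⟩
      · rintro (h | ⟨c, (rfl | hc), hpc, hx⟩)
        · exact Or.inl (Or.inl h)
        · exact Or.inl (Or.inr hx)
        · exact Or.inr ⟨c, hc, hpc, hx⟩
    · simp only [if_neg hb, List.mem_cons]
      constructor
      · rintro (h | ⟨c, hc, hpc, hx⟩)
        · exact Or.inl h
        · exact Or.inr ⟨c, Or.inr hc, hpc, hx⟩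
      · rintro (h | ⟨c, (rfl | hc), hpc, hx⟩)
        · exact Or.inl h
        · exact absurd hpc hb
        · exact Or.inr ⟨c, hc, hpc, hx⟩

-- the common cell characterisation
@[reducible] def pvCell (others : List (List Int)) (x : Int × Int) : Prop :=
  ∃ rr ∈ PySem.List.enumerate others, ∃ cv ∈ PySem.List.enumerate rr.2,
    cv.2 ≠ 4 ∧ x = (cv.1 + 1, 16 - rr.1)

theorem pv_mem_stops_fold (rows : List (Int × List Int)) (s : List (Int × Int)) (x : Int × Int) :
    x ∈ rows.foldl (fun s rr =>
        (PySem.List.enumerate rr.2).foldl (fun s2 cv =>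
          if cv.2 ≠ 4 then PySem.Set.add s2 (cv.1 + 1, 16 - rr.1) else s2) s) s
      ↔ x ∈ s ∨ ∃ rr ∈ rows, ∃ cv ∈ PySem.List.enumerate rr.2, cv.2 ≠ 4 ∧ x = (cv.1 + 1, 16 - rr.1) := by
  induction rows generalizing s with
  | nil => simp
  | cons rr rest ih =>
    simp only [List.foldl_cons, ih, List.mem_cons,
      pv_mem_foldl_add (PySem.List.enumerate rr.2) (fun cv => cv.2 ≠ 4)
        (fun cv => (cv.1 + 1, 16 - rr.1)) s x]
    constructor
    · rintro ((h | ⟨cv, hcv, h4, hx⟩) | ⟨q, hq, cv, hcv, h4, hx⟩)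
      · exact Or.inl h
      · exact Or.inr ⟨rr, Or.inl rfl, cv, hcv, h4, hx⟩
      · exact Or.inr ⟨q, Or.inr hq, cv, hcv, h4, hx⟩
    · rintro (h | ⟨q, (rfl | hq), cv, hcv, h4, hx⟩)
      · exact Or.inl (Or.inl h)
      · exact Or.inl (Or.inr ⟨cv, hcv, h4, hx⟩)
      · exact Or.inr ⟨q, hq, cv, hcv, h4, hx⟩

theorem pv_mem_stops (others : List (List Int)) (x : Int × Int) :
    x ∈ pvStops others ↔ pvCell others x := by
  unfold pvStops pvCell PySem.Set.empty
  rw [pv_mem_stops_fold]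
  simp

theorem pv_mem_posA_fold (rows : List (Int × List Int)) (s : List (Int × (Int × Int))) (x : Int × (Int × Int)) :
    x ∈ rows.foldl (fun found rr =>
        (PySem.List.enumerate rr.2).foldl (fun found2 cv =>
          if cv.2 ≠ 4 then found2 ++ [(cv.2, (cv.1 + 1, 15 - rr.1 + 1))] else found2) found) s
      ↔ x ∈ s ∨ ∃ rr ∈ rows, ∃ cv ∈ PySem.List.enumerate rr.2, cv.2 ≠ 4 ∧ x = (cv.2, (cv.1 + 1, 15 - rr.1 + 1)) := by
  induction rows generalizing s with
  | nil => simp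
  | cons rr rest ih =>
    simp only [List.foldl_cons, ih, List.mem_cons,
      pv_mem_foldl_append (PySem.List.enumerate rr.2) (fun cv => cv.2 ≠ 4)
        (fun cv => (cv.2, (cv.1 + 1, 15 - rr.1 + 1))) s x]
    constructor
    · rintro ((h | ⟨cv, hcv, h4, hx⟩) | ⟨q, hq, cv, hcv, h4, hx⟩)
      · exact Or.inl h
      · exact Or.inr ⟨rr, Or.inl rfl, cv, hcv, h4, hx⟩
      · exact Or.inr ⟨q, Or.inr hq, cv, hcv, h4, hx⟩
    · rintro (h | ⟨q, (rfl | hq), cv, hcv, h4, hx⟩)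
      · exact Or.inl (Or.inl h)
      · exact Or.inl (Or.inr ⟨cv, hcv, h4, hx⟩)
      · exact Or.inr ⟨q, hq, cv, hcv, h4, hx⟩

theorem pv_mem_posA (others : List (List Int)) (x : Int × Int) :
    x ∈ (find_stopped_blocks_pos others).map (·.2) ↔ pvCell others x := by
  unfold find_stopped_blocks_pos pvCell
  simp only [List.mem_map]
  constructor
  · rintro ⟨y, hy, rfl⟩
    rw [pv_mem_posA_fold] at hy
    rcases hy with h | ⟨q, hq, cv, hcv, h4, rfl⟩
    · simp at h
    · exact ⟨q, hq, cv, hcv, h4, by simp; ring⟩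
  · rintro ⟨q, hq, cv, hcv, h4, rfl⟩
    refine ⟨(cv.2, (cv.1 + 1, 15 - q.1 + 1)), ?_, by simp; ring⟩
    rw [pv_mem_posA_fold]
    exact Or.inr ⟨q, hq, cv, hcv, h4, rfl⟩

-- one-direction bridge: A's branch condition is exactly "shifted block = other position"
theorem pv_cond_shift (direc : String) (dx dy : Int)
    (hd : (direc = "above" ∧ dx = 0 ∧ dy = 1) ∨ (direc = "left" ∧ dx = -1 ∧ dy = 0)
        ∨ (direc = "right" ∧ dx = 1 ∧ dy = 0))
    (o : Int × Int) (b : List Int) :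
    pvCondB direc o b = true
      ↔ (PySem.List.pyGetD b 0 0 + dx, PySem.List.pyGetD b 1 0 + dy) = o := by
  rcases hd with ⟨rfl, rfl, rfl⟩ | ⟨rfl, rfl, rfl⟩ | ⟨rfl, rfl, rfl⟩ <;>
    simp [pvCondB, Prod.ext_iff] <;> constructor <;> rintro ⟨h1, h2⟩ <;>
    exact ⟨by omega, by omega⟩

-- the intersection test of B, as an existential
theorem pv_inter_ne_nil {α : Type} [BEq α] [LawfulBEq α] (s t : List α) :
    PySem.Set.inter s t ≠ [] ↔ ∃ x, x ∈ PySem.Set.inter s t := by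
  cases h : PySem.Set.inter s t <;> simp_all

-- B for a valid direction, as the same if-exists form
theorem pv_alt_valid (blocks others : List (List Int)) (direc : String) (dx dy : Int)
    (hoff : pvOffset direc = some (dx, dy)) :
    check_block_hit_alt blocks others direc
      = if ∃ b ∈ blocks, pvCell others (PySem.List.pyGetD b 0 0 + dx, PySem.List.pyGetD b 1 0 + dy)
        then some true else none := by
  unfold check_block_hit_alt
  rw [hoff]
  dsimp only
  have hmem : ∀ x : Int × Int,
      x ∈ PySem.Set.inter
        (PySem.Set.ofList (blocks.map fun b =>
          (PySem.List.pyGetD b 0 0 + dx, PySem.List.pyGetD b 1 0 + dy))) (pvStops others)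
      ↔ (∃ b ∈ blocks, x = (PySem.List.pyGetD b 0 0 + dx, PySem.List.pyGetD b 1 0 + dy))
          ∧ pvCell others x := by
    intro x
    rw [PySem.Set.mem_inter, PySem.Set.mem_ofList, List.mem_map, pv_mem_stops]
    constructor
    · rintro ⟨⟨b, hb, rfl⟩, h2⟩; exact ⟨⟨b, hb, rfl⟩, h2⟩
    · rintro ⟨⟨b, hb, rfl⟩, h2⟩; exact ⟨⟨b, hb, rfl⟩, h2⟩
  rcases Classical.em (∃ b ∈ blocks, pvCell others (PySem.List.pyGetD b 0 0 + dx, PySem.List.pyGetD b 1 0 + dy)) with h | h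
  · rw [if_pos h]
    rcases h with ⟨b, hb, hc⟩
    rw [if_pos]
    rw [pv_inter_ne_nil]
    exact ⟨_, (hmem _).2 ⟨⟨b, hb, rfl⟩, hc⟩⟩
  · rw [if_neg h, if_neg]
    rw [pv_inter_ne_nil]
    rintro ⟨y, hy⟩
    rcases (hmem y).1 hy with ⟨⟨b, hb, rfl⟩, hc⟩
    exact h ⟨b, hb, hc⟩

-- ===== VERDICT (by name: the statement is the Claim_ definition above) =====
theorem check_block_hit_spec : Claim_equal_check_block_hit := by
  intro blocks others direc _hdom _hpre
  unfold Spec_check_block_hit check_block_hit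
  rw [pvOuterA_eq]
  have hvalid : ∀ dx dy : Int,
      ((direc = "above" ∧ dx = 0 ∧ dy = 1) ∨ (direc = "left" ∧ dx = -1 ∧ dy = 0)
        ∨ (direc = "right" ∧ dx = 1 ∧ dy = 0)) →
      pvOffset direc = some (dx, dy) →
      (if ((find_stopped_blocks_pos others).map (·.2)).any
          (fun o => blocks.any (pvCondB direc o)) = true then some true else none)
        = check_block_hit_alt blocks others direc := by
    intro dx dy hd hoff
    rw [pv_alt_valid blocks others direc dx dy hoff]
    congr 1
    simp only [eq_iff_iff, List.any_eq_true]
    constructor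
    · rintro ⟨o, ho, b, hb, hc⟩
      rw [pv_cond_shift direc dx dy hd] at hc
      exact ⟨b, hb, by rw [hc]; exact (pv_mem_posA others o).1 ho⟩
    · rintro ⟨b, hb, hc⟩
      refine ⟨(PySem.List.pyGetD b 0 0 + dx, PySem.List.pyGetD b 1 0 + dy),
        (pv_mem_posA others _).2 hc, b, hb, ?_⟩
      rw [pv_cond_shift direc dx dy hd]
  by_cases h1 : direc = "above"
  · exact hvalid 0 1 (Or.inl ⟨h1, rfl, rfl⟩) (by simp [pvOffset, h1])
  · by_cases h2 : direc = "left"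
    · exact hvalid (-1) 0 (Or.inr (Or.inl ⟨h2, rfl, rfl⟩)) (by simp [pvOffset, h2, h1])
    · by_cases h3 : direc = "right"
      · exact hvalid 1 0 (Or.inr (Or.inr ⟨h3, rfl, rfl⟩)) (by simp [pvOffset, h3, h1, h2])
      · -- no valid direction: A's branch conditions are all dead, B's lookup misses
        have hall : (((find_stopped_blocks_pos others).map (·.2)).any
            (fun o => blocks.any (pvCondB direc o))) = false := by
          simp only [List.any_eq_false]
          intro o _
          simp [List.any_eq_false, pvCondB, h1, h2, h3]
        rw [hall]
        simp [check_block_hit_alt, pvOffset, h1, h2, h3]
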